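-- pv_equiv track=rewrite | github.com/JonasHeinickeBio/HeLLMholtz | src/hellmholtz/monitoring.py | _categorize_model
-- ===== SOURCE A (Python) =====
-- def _categorize_model(model_name: str) -> str:
--     """Categorize a model based on its name.
--
--     Args:
--         model_name: Name of the model.
--
--     Returns:
--         Category string.
--     """
--     name_lower = model_name.lower()
--
--     if "alias" in name_lower:
--         return "alias"
--     elif "legacy" in name_lower or "old" in name_lower:
--         return "legacy"
--     elif any(term in name_lower for term in ["3b", "7b", "14b", "32b", "70b", "120b", "405b"]):
--         return "base_model"
--     elif any(term in name_lower for term in ["instruct", "chat", "conversational"]):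
--         return "instruction_tuned"
--     else:
--         return "other"
-- ===== SOURCE B (Python) =====
-- CATEGORIES = ["alias", "legacy", "base_model", "instruction_tuned"]
--
-- TERM_PRIORITY = {
--     "alias": 0,
--     "legacy": 1, "old": 1,
--     "3b": 2, "7b": 2, "14b": 2, "32b": 2, "70b": 2, "120b": 2, "405b": 2,
--     "instruct": 3, "chat": 3, "conversational": 3,
-- }
--
--
-- def _categorize_model(model_name: str) -> str:
--     name_lower = model_name.lower()
--     matched = [p for t, p in TERM_PRIORITY.items() if t in name_lower]
--     return CATEGORIES[min(matched)] if matched else "other"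
-- ===== Notes on version B (the rewrite author's own statement) =====
-- stated objective: alternative
-- what changed: Instead of an ordered if/elif chain with early return, B exhaustively matches all keyword terms against the lowered name via a term-to-priority map, then takes the minimum matched priority and indexes a category table (default 'other' when nothing matches).
import Mathlib
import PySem

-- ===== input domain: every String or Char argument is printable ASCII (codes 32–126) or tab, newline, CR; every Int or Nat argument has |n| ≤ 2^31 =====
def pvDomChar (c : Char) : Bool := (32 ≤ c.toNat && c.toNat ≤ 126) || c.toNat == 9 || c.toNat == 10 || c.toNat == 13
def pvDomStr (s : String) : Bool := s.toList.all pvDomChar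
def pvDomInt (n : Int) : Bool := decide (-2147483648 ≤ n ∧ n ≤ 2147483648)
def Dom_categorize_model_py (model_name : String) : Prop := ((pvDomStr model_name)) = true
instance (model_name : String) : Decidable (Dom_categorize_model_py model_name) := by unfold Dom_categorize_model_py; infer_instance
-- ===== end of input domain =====

-- B replaces A's early-return if/elif chain by exhaustive matching: a term→priority map, minimum matched priority, category-table lookup (alternative decomposition; same cost).

-- ===== PORT A =====
def categorize_model_py (model_name : String) : String :=
  let name_lower := PySem.Str.lower model_name
  if PySem.Str.isIn "alias" name_lower then "alias"
  else if PySem.Str.isIn "legacy" name_lower || PySem.Str.isIn "old" name_lower then "legacy"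
  else if ["3b", "7b", "14b", "32b", "70b", "120b", "405b"].any (fun term => PySem.Str.isIn term name_lower) then "base_model"
  else if ["instruct", "chat", "conversational"].any (fun term => PySem.Str.isIn term name_lower) then "instruction_tuned"
  else "other"

-- ===== PORT B =====
def pvCategories : List String := ["alias", "legacy", "base_model", "instruction_tuned"]

def pvTermPriority : List (String × Int) :=
  [("alias", 0),
   ("legacy", 1), ("old", 1),
   ("3b", 2), ("7b", 2), ("14b", 2), ("32b", 2), ("70b", 2), ("120b", 2), ("405b", 2),
   ("instruct", 3), ("chat", 3), ("conversational", 3)]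

def categorize_model_py_alt (model_name : String) : String :=
  let name_lower := PySem.Str.lower model_name
  let matched := (pvTermPriority.filter (fun tp => PySem.Str.isIn tp.1 name_lower)).map Prod.snd
  match PySem.List.min? matched (fun x => x) with
  | some m => (PySem.List.pyGet? pvCategories m).getD "other"   -- CATEGORIES[min(matched)]; the index is always in range, getD only discharges the Option
  | none => "other"

-- ===== PRECONDITION & SPEC =====
def Spec_categorize_model_py (model_name : String) (out : String) : Prop := out = categorize_model_py_alt model_name
instance (model_name : String) (out : String) : Decidable (Spec_categorize_model_py model_name out) := by unfold Spec_categorize_model_py; infer_instance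

-- ===== CLAIM (what is proved, stated in full; the proofs are below) =====
def Claim_equal_categorize_model_py : Prop := ∀ (model_name : String), Dom_categorize_model_py model_name → Spec_categorize_model_py model_name (categorize_model_py model_name)

-- ===== LEMMAS AND PROOFS =====

theorem pv_foldl_min_self (t : List Int) (x : Int) (h : ∀ y ∈ t, x ≤ y) : t.foldl min x = x := by
  induction t generalizing x with
  | nil => rfl
  | cons a t ih =>
    simp only [List.foldl_cons]
    rw [min_eq_left (h a (by simp))]
    exact ih x (fun y hy => h y (by simp [hy]))

theorem pv_find?_eq_head?_filter {α : Type} (p : α → Bool) (l : List α) :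
    l.find? p = (l.filter p).head? := by
  induction l with
  | nil => rfl
  | cons a t ih =>
    rw [List.find?_cons, List.filter_cons]
    cases h : p a
    · simp only [Bool.false_eq_true, if_false]
      exact ih
    · simp only [if_true, List.head?_cons]

theorem pv_min_matched (p : String × Int → Bool) :
    PySem.List.min? ((pvTermPriority.filter p).map Prod.snd) (fun x => x)
      = (pvTermPriority.find? p).map Prod.snd := by
  have hpw : List.Pairwise (fun a b : String × Int => a.2 ≤ b.2) pvTermPriority := by decide
  have hpwf : List.Pairwise (fun a b : String × Int => a.2 ≤ b.2) (pvTermPriority.filter p) :=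
    hpw.sublist List.filter_sublist
  rw [pv_find?_eq_head?_filter]
  cases hfil : pvTermPriority.filter p with
  | nil => simp [PySem.List.min?]
  | cons hd tl =>
    rw [hfil] at hpwf
    have hle : ∀ y ∈ tl.map Prod.snd, hd.2 ≤ y := by
      intro y hy
      obtain ⟨b, hb, rfl⟩ := List.mem_map.mp hy
      exact (List.pairwise_cons.mp hpwf).1 b hb
    simp only [List.map_cons, PySem.List.min?_id_cons, List.head?_cons]
    rw [pv_foldl_min_self _ _ hle]
    rfl


-- ===== VERDICT (by name: the statement is the Claim_ definition above) =====
theorem categorize_model_py_spec : Claim_equal_categorize_model_py := by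
  intro model_name _
  unfold Spec_categorize_model_py categorize_model_py categorize_model_py_alt
  simp only []
  rw [pv_min_matched (fun tp => PySem.Str.isIn tp.1 (PySem.Str.lower model_name))]
  by_cases h1 : PySem.Str.isIn "alias" (PySem.Str.lower model_name) = true
  · simp only [List.find?, List.any_cons, List.any_nil, pvTermPriority, pvCategories, Bool.true_or, Bool.false_or, Bool.or_false, Bool.or_true, Bool.false_eq_true, Option.map_some, Option.map_none, if_true, if_false, h1]
    try decide
  · 
    by_cases h2 : PySem.Str.isIn "legacy" (PySem.Str.lower model_name) = true
    · simp only [Bool.not_eq_true] at h1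
      simp only [List.find?, List.any_cons, List.any_nil, pvTermPriority, pvCategories, Bool.true_or, Bool.false_or, Bool.or_false, Bool.or_true, Bool.false_eq_true, Option.map_some, Option.map_none, if_true, if_false, h1, h2]
      try decide
    · 
      by_cases h3 : PySem.Str.isIn "old" (PySem.Str.lower model_name) = true
      · simp only [Bool.not_eq_true] at h1 h2
        simp only [List.find?, List.any_cons, List.any_nil, pvTermPriority, pvCategories, Bool.true_or, Bool.false_or, Bool.or_false, Bool.or_true, Bool.false_eq_true, Option.map_some, Option.map_none, if_true, if_false, h1, h2, h3]
        try decide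
      · 
        by_cases h4 : PySem.Str.isIn "3b" (PySem.Str.lower model_name) = true
        · simp only [Bool.not_eq_true] at h1 h2 h3
          simp only [List.find?, List.any_cons, List.any_nil, pvTermPriority, pvCategories, Bool.true_or, Bool.false_or, Bool.or_false, Bool.or_true, Bool.false_eq_true, Option.map_some, Option.map_none, if_true, if_false, h1, h2, h3, h4]
          try decide
        · 
          by_cases h5 : PySem.Str.isIn "7b" (PySem.Str.lower model_name) = true
          · simp only [Bool.not_eq_true] at h1 h2 h3 h4
            simp only [List.find?, List.any_cons, List.any_nil, pvTermPriority, pvCategories, Bool.true_or, Bool.false_or, Bool.or_false, Bool.or_true, Bool.false_eq_true, Option.map_some, Option.map_none, if_true, if_false, h1, h2, h3, h4, h5]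
            try decide
          · 
            by_cases h6 : PySem.Str.isIn "14b" (PySem.Str.lower model_name) = true
            · simp only [Bool.not_eq_true] at h1 h2 h3 h4 h5
              simp only [List.find?, List.any_cons, List.any_nil, pvTermPriority, pvCategories, Bool.true_or, Bool.false_or, Bool.or_false, Bool.or_true, Bool.false_eq_true, Option.map_some, Option.map_none, if_true, if_false, h1, h2, h3, h4, h5, h6]
              try decide
            · 
              by_cases h7 : PySem.Str.isIn "32b" (PySem.Str.lower model_name) = true
              · simp only [Bool.not_eq_true] at h1 h2 h3 h4 h5 h6
                simp only [List.find?, List.any_cons, List.any_nil, pvTermPriority, pvCategories, Bool.true_or, Bool.false_or, Bool.or_false, Bool.or_true, Bool.false_eq_true, Option.map_some, Option.map_none, if_true, if_false, h1, h2, h3, h4, h5, h6, h7]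
                try decide
              · 
                by_cases h8 : PySem.Str.isIn "70b" (PySem.Str.lower model_name) = true
                · simp only [Bool.not_eq_true] at h1 h2 h3 h4 h5 h6 h7
                  simp only [List.find?, List.any_cons, List.any_nil, pvTermPriority, pvCategories, Bool.true_or, Bool.false_or, Bool.or_false, Bool.or_true, Bool.false_eq_true, Option.map_some, Option.map_none, if_true, if_false, h1, h2, h3, h4, h5, h6, h7, h8]
                  try decide
                · 
                  by_cases h9 : PySem.Str.isIn "120b" (PySem.Str.lower model_name) = true
                  · simp only [Bool.not_eq_true] at h1 h2 h3 h4 h5 h6 h7 h8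
                    simp only [List.find?, List.any_cons, List.any_nil, pvTermPriority, pvCategories, Bool.true_or, Bool.false_or, Bool.or_false, Bool.or_true, Bool.false_eq_true, Option.map_some, Option.map_none, if_true, if_false, h1, h2, h3, h4, h5, h6, h7, h8, h9]
                    try decide
                  · 
                    by_cases h10 : PySem.Str.isIn "405b" (PySem.Str.lower model_name) = true
                    · simp only [Bool.not_eq_true] at h1 h2 h3 h4 h5 h6 h7 h8 h9
                      simp only [List.find?, List.any_cons, List.any_nil, pvTermPriority, pvCategories, Bool.true_or, Bool.false_or, Bool.or_false, Bool.or_true, Bool.false_eq_true, Option.map_some, Option.map_none, if_true, if_false, h1, h2, h3, h4, h5, h6, h7, h8, h9, h10]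
                      try decide
                    · 
                      by_cases h11 : PySem.Str.isIn "instruct" (PySem.Str.lower model_name) = true
                      · simp only [Bool.not_eq_true] at h1 h2 h3 h4 h5 h6 h7 h8 h9 h10
                        simp only [List.find?, List.any_cons, List.any_nil, pvTermPriority, pvCategories, Bool.true_or, Bool.false_or, Bool.or_false, Bool.or_true, Bool.false_eq_true, Option.map_some, Option.map_none, if_true, if_false, h1, h2, h3, h4, h5, h6, h7, h8, h9, h10, h11]
                        try decide
                      · 
                        by_cases h12 : PySem.Str.isIn "chat" (PySem.Str.lower model_name) = true
                        · simp only [Bool.not_eq_true] at h1 h2 h3 h4 h5 h6 h7 h8 h9 h10 h11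
                          simp only [List.find?, List.any_cons, List.any_nil, pvTermPriority, pvCategories, Bool.true_or, Bool.false_or, Bool.or_false, Bool.or_true, Bool.false_eq_true, Option.map_some, Option.map_none, if_true, if_false, h1, h2, h3, h4, h5, h6, h7, h8, h9, h10, h11, h12]
                          try decide
                        · 
                          by_cases h13 : PySem.Str.isIn "conversational" (PySem.Str.lower model_name) = true
                          · simp only [Bool.not_eq_true] at h1 h2 h3 h4 h5 h6 h7 h8 h9 h10 h11 h12
                            simp only [List.find?, List.any_cons, List.any_nil, pvTermPriority, pvCategories, Bool.true_or, Bool.false_or, Bool.or_false, Bool.or_true, Bool.false_eq_true, Option.map_some, Option.map_none, if_true, if_false, h1, h2, h3, h4, h5, h6, h7, h8, h9, h10, h11, h12, h13]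
                            try decide
                          · simp only [Bool.not_eq_true] at h1 h2 h3 h4 h5 h6 h7 h8 h9 h10 h11 h12 h13
                            simp only [List.find?, List.any_cons, List.any_nil, pvTermPriority, pvCategories, Bool.true_or, Bool.false_or, Bool.or_false, Bool.or_true, Bool.false_eq_true, Option.map_some, Option.map_none, if_true, if_false, h1, h2, h3, h4, h5, h6, h7, h8, h9, h10, h11, h12, h13]
                            try decide
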